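-- pv_equiv track=rewrite | github.com/limit5/OmniSight-Productizer | backend/db_connection.py | _qmark_to_dollar
-- ===== SOURCE A (Python) =====
-- def _qmark_to_dollar(sql: str) -> str:
--     """Convert SQLite ``?`` placeholders to asyncpg ``$N``.
--
--     String-literal aware (single-quoted, with SQL doubled-quote
--     escape). No regex → predictable, no catastrophic backtracking.
--     """
--     out: list[str] = []
--     i = 0
--     n = 0
--     in_str = False
--     while i < len(sql):
--         c = sql[i]
--         if in_str:
--             out.append(c)
--             if c == "'":
--                 # Doubled '' escapes a quote; peek ahead.
--                 if i + 1 < len(sql) and sql[i + 1] == "'":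
--                     out.append("'")
--                     i += 2
--                     continue
--                 in_str = False
--             i += 1
--             continue
--         if c == "'":
--             in_str = True
--             out.append(c)
--             i += 1
--             continue
--         if c == "?":
--             n += 1
--             out.append(f"${n}")
--             i += 1
--             continue
--         out.append(c)
--         i += 1
--     return "".join(out)
-- ===== SOURCE B (Python) =====
-- def _literal_end(s: str) -> int:
--     """s starts with the opening quote; return index just past the literal
--     (past the closing quote, or len(s) if unterminated)."""
--     j = 1
--     while j < len(s):
--         if s[j] == "'":
--             if s[j + 1:j + 2] == "'":
--                 j += 2
--             else:
--                 return j + 1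
--         else:
--             j += 1
--     return j
--
--
-- def _qmark_to_dollar(sql: str) -> str:
--     parts = []
--     n = 0
--     rest = sql
--     while rest:
--         if rest[0] == "'":
--             end = _literal_end(rest)
--             parts.append(rest[:end])
--             rest = rest[end:]
--         else:
--             cut = rest.find("'")
--             chunk = rest if cut < 0 else rest[:cut]
--             rest = "" if cut < 0 else rest[cut:]
--             pieces = chunk.split("?")
--             parts.append(pieces[0])
--             for piece in pieces[1:]:
--                 n += 1
--                 parts.append(f"${n}")
--                 parts.append(piece)
--     return "".join(parts)
-- ===== Notes on version B (the rewrite author's own statement) =====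
-- stated objective: faster
-- what changed: Replaces A's per-character while-loop state machine (in_str flag, peek-ahead, one append per character) with a segment scanner that copies whole single-quoted literals verbatim in one slice and converts each quote-free chunk by splitting on the question mark and rejoining with $1..$N.
import Mathlib
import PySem

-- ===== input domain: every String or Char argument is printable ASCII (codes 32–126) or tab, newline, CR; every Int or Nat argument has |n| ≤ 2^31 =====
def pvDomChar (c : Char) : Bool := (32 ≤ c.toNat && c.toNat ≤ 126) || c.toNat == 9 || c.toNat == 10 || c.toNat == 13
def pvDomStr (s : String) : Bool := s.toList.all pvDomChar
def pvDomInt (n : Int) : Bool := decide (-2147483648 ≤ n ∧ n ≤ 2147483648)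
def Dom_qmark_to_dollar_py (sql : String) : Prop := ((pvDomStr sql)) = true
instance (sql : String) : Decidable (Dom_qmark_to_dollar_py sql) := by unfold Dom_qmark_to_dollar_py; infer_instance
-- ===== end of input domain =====

-- B rewrites A's per-character state machine as a segment scanner (copy whole
-- string literals in one slice, split quote-free chunks on the question mark);
-- same O(n), measurably faster by bulk string operations.

-- ===== PORT A =====
-- A's while-loop, one character at a time, with state (in_str, n); the `out`
-- accumulator becomes the result list built front-to-back.
def pvGoA : List Char → Bool → Int → List Char
  | [], _, _ => []
  | c :: r0 :: rest2, true, n =>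
      if c = '\'' then
        if r0 = '\'' then c :: '\'' :: pvGoA rest2 true n
        else c :: pvGoA (r0 :: rest2) false n
      else c :: pvGoA (r0 :: rest2) true n
  | [c], true, n =>
      if c = '\'' then c :: pvGoA [] false n
      else c :: pvGoA [] true n
  | c :: rest, false, n =>
      if c = '\'' then c :: pvGoA rest true n
      else if c = '?' then ('$' :: (PySem.Int.toStr (n + 1)).toList) ++ pvGoA rest false (n + 1)
      else c :: pvGoA rest false n

def qmark_to_dollar_py (sql : String) : String := String.ofList (pvGoA sql.toList false 0)

-- ===== PORT B =====
-- port of _literal_end: number of characters of the literal after the opening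
-- quote (through the closing quote if terminated)
def pvLitLen : List Char → Nat
  | [] => 0
  | c :: r =>
      if c = '\'' then
        match r with
        | r0 :: r2 => if r0 = '\'' then 2 + pvLitLen r2 else 1
        | [] => 1
      else 1 + pvLitLen r

-- chunk.split("?")
def pvSplitQ : List Char → List (List Char)
  | [] => [[]]
  | c :: r =>
      if c = '?' then [] :: pvSplitQ r
      else match pvSplitQ r with
        | p :: ps => (c :: p) :: ps
        | [] => [[c]]

-- the `for piece in pieces[1:]` loop: emit $n and the piece, thread the counter
def pvJoinRest : List (List Char) → Int → List Char × Int
  | [], n => ([], n)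
  | p :: ps, n =>
      let out := pvJoinRest ps (n + 1)
      (('$' :: (PySem.Int.toStr (n + 1)).toList) ++ p ++ out.1, out.2)

def pvJoinPieces : List (List Char) → Int → List Char × Int
  | [], n => ([], n)
  | p :: ps, n =>
      let out := pvJoinRest ps n
      (p ++ out.1, out.2)

-- B's outer while-loop over `rest`: copy a literal whole, or convert a chunk
def pvGoB : List Char → Int → List Char
  | [], _ => []
  | c :: r, n =>
      if h : c = '\'' then
        let len := pvLitLen r
        (c :: r.take len) ++ pvGoB (r.drop len) n
      else
        let chunk := (c :: r).takeWhile (· ≠ '\'')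
        let rest := (c :: r).dropWhile (· ≠ '\'')
        let out := pvJoinPieces (pvSplitQ chunk) n
        out.1 ++ pvGoB rest out.2
  termination_by s _ => s.length
  decreasing_by
  · simp only [List.length_drop, List.length_cons]; omega
  · have hch : (c :: r).takeWhile (· ≠ '\'') = c :: r.takeWhile (· ≠ '\'') := by
      simp [h]
    have : (((c :: r).takeWhile (· ≠ '\'')) ++ ((c :: r).dropWhile (· ≠ '\''))).length
        = (c :: r).length := by
      rw [List.takeWhile_append_dropWhile]
    rw [List.length_append] at this
    simp only [hch, List.length_cons] at this ⊢
    omega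

def qmark_to_dollar_py_alt (sql : String) : String := String.ofList (pvGoB sql.toList 0)

-- ===== PRECONDITION & SPEC =====
def Spec_qmark_to_dollar_py (sql : String) (out : String) : Prop := out = qmark_to_dollar_py_alt sql
instance (sql : String) (out : String) : Decidable (Spec_qmark_to_dollar_py sql out) := by unfold Spec_qmark_to_dollar_py; infer_instance

-- ===== CLAIM (what is proved, stated in full; the proofs are below) =====
def Claim_equal_qmark_to_dollar_py : Prop := ∀ (sql : String), Dom_qmark_to_dollar_py sql → Spec_qmark_to_dollar_py sql (qmark_to_dollar_py sql)

-- ===== LEMMAS AND PROOFS =====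

-- A's in-string mode copies exactly the pvLitLen-long literal verbatim
theorem pvGoA_inStr (s : List Char) (n : Int) :
    pvGoA s true n = s.take (pvLitLen s) ++ pvGoA (s.drop (pvLitLen s)) false n := by
  match s with
  | [] => simp [pvGoA, pvLitLen]
  | [c] =>
    by_cases hc : c = '\''
    · subst hc; simp [pvGoA, pvLitLen]
    · simp [pvGoA, pvLitLen, hc]
  | c :: r0 :: r2 =>
    by_cases hc : c = '\''
    · subst hc
      by_cases h2 : r0 = '\''
      · subst h2
        have ih := pvGoA_inStr r2 n
        have h22 : 2 + pvLitLen r2 = (pvLitLen r2 + 1) + 1 := by omega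
        simp [pvGoA, pvLitLen, h22, List.take_succ_cons, List.drop_succ_cons, ih]
      · simp [pvGoA, pvLitLen, h2]
    · have ih := pvGoA_inStr (r0 :: r2) n
      have h1 : pvLitLen (c :: r0 :: r2) = 1 + pvLitLen (r0 :: r2) := by
        simp [pvLitLen, hc]
      simp only [pvGoA, if_neg hc, h1, add_comm 1, List.take_succ_cons, List.drop_succ_cons]
      rw [ih]
      simp
  termination_by s.length

-- A-shaped conversion of a quote-free chunk (proof-only characterisation)
def pvConv : List Char → Int → List Char
  | [], _ => []
  | c :: r, n =>
      if c = '?' then ('$' :: (PySem.Int.toStr (n + 1)).toList) ++ pvConv r (n + 1)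
      else c :: pvConv r n

def pvQCount : List Char → Int
  | [] => 0
  | c :: r => (if c = '?' then 1 else 0) + pvQCount r

theorem pvSplitQ_ne_nil (r : List Char) : pvSplitQ r ≠ [] := by
  cases r with
  | nil => simp [pvSplitQ]
  | cons c r =>
      simp only [pvSplitQ]
      split
      · simp
      · split <;> simp_all

theorem pvJoinRest_cons (p : List Char) (ps : List (List Char)) (n : Int) :
    pvJoinRest (p :: ps) n =
      ((('$' :: (PySem.Int.toStr (n + 1)).toList) ++ p ++ (pvJoinRest ps (n + 1)).1),
        (pvJoinRest ps (n + 1)).2) := rfl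

theorem pvJoinPieces_cons (p : List Char) (ps : List (List Char)) (n : Int) :
    pvJoinPieces (p :: ps) n = (p ++ (pvJoinRest ps n).1, (pvJoinRest ps n).2) := rfl

-- split-then-join equals the A-shaped conversion, and the threaded counter is n + #?
theorem pvJoin_split (r : List Char) (n : Int) :
    (pvJoinPieces (pvSplitQ r) n).1 = pvConv r n ∧
    (pvJoinPieces (pvSplitQ r) n).2 = n + pvQCount r := by
  induction r generalizing n with
  | nil => simp [pvSplitQ, pvJoinPieces, pvJoinRest, pvConv, pvQCount]
  | cons c r ih =>
      obtain ⟨p, ps, hps⟩ : ∃ p ps, pvSplitQ r = p :: ps := by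
        cases hsq0 : pvSplitQ r with
        | nil => exact absurd hsq0 (pvSplitQ_ne_nil r)
        | cons p ps => exact ⟨p, ps, rfl⟩
      by_cases hc : c = '?'
      · subst hc
        have hsq : pvSplitQ ('?' :: r) = [] :: p :: ps := by simp [pvSplitQ, hps]
        have ih1 : p ++ (pvJoinRest ps (n + 1)).1 = pvConv r (n + 1) := by
          simpa [hps, pvJoinPieces_cons] using (ih (n + 1)).1
        have ih2 : (pvJoinRest ps (n + 1)).2 = n + 1 + pvQCount r := by
          simpa [hps, pvJoinPieces_cons] using (ih (n + 1)).2
        rw [hsq, pvJoinPieces_cons, pvJoinRest_cons]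
        constructor
        · simp only [pvConv, List.nil_append]
          rw [← ih1]
          simp
        · show (pvJoinRest ps (n + 1)).2 = n + pvQCount ('?' :: r)
          simp [pvQCount, ih2]
          omega
      · have hsq : pvSplitQ (c :: r) = (c :: p) :: ps := by simp [pvSplitQ, hc, hps]
        have ih1 : p ++ (pvJoinRest ps n).1 = pvConv r n := by
          simpa [hps, pvJoinPieces_cons] using (ih n).1
        have ih2 : (pvJoinRest ps n).2 = n + pvQCount r := by
          simpa [hps, pvJoinPieces_cons] using (ih n).2
        rw [hsq, pvJoinPieces_cons]
        constructor
        · simp only [pvConv, if_neg hc]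
          rw [← ih1]
          simp
        · show (pvJoinRest ps n).2 = n + pvQCount (c :: r)
          simp [pvQCount, hc, ih2]

-- A on a quote-free chunk followed by anything: convert the chunk, advance the counter
theorem pvGoA_chunk (chunk rest : List Char) (hq : ∀ c ∈ chunk, c ≠ '\'') (n : Int) :
    pvGoA (chunk ++ rest) false n = pvConv chunk n ++ pvGoA rest false (n + pvQCount chunk) := by
  induction chunk generalizing n with
  | nil => simp [pvConv, pvQCount]
  | cons c r ihc =>
      have hc : c ≠ '\'' := hq c (by simp)
      have hr : ∀ x ∈ r, x ≠ '\'' := fun x hx => hq x (by simp [hx])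
      by_cases h? : c = '?'
      · subst h?
        simp only [List.cons_append, pvGoA, pvConv, pvQCount, if_neg hc, ihc hr]
        simp [add_comm, add_left_comm]
      · simp only [List.cons_append, pvGoA, pvConv, pvQCount, if_neg hc, if_neg h?, ihc hr]
        simp

theorem pvGoA_eq_pvGoB (s : List Char) (n : Int) : pvGoA s false n = pvGoB s n := by
  induction s, n using pvGoB.induct with
  | case1 n => simp [pvGoA, pvGoB]
  | case2 r n len ih =>
      rw [pvGoB]
      simp only [pvGoA, pvGoA_inStr]
      rw [ih]
      simp
      rfl
  | case3 c r n hq chunk_ rest_ out_ ih =>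
      rw [pvGoB]
      simp only [dif_neg hq]
      have hsplit : ((c :: r).takeWhile (· ≠ '\'')) ++ ((c :: r).dropWhile (· ≠ '\'')) = c :: r :=
        List.takeWhile_append_dropWhile
      have hmem : ∀ x ∈ (c :: r).takeWhile (· ≠ '\''), x ≠ '\'' := by
        intro x hx
        have := List.mem_takeWhile_imp hx
        simpa using this
      have hj := pvJoin_split ((c :: r).takeWhile (· ≠ '\'')) n
      have ih' : pvGoA ((c :: r).dropWhile (· ≠ '\'')) false
            (n + pvQCount ((c :: r).takeWhile (· ≠ '\''))) =
          pvGoB ((c :: r).dropWhile (· ≠ '\''))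
            (n + pvQCount ((c :: r).takeWhile (· ≠ '\''))) := by
        rw [← hj.2]
        exact ih
      conv_lhs => rw [← hsplit]
      rw [pvGoA_chunk _ _ hmem n, hj.1, hj.2, ih']

-- ===== VERDICT (by name: the statement is the Claim_ definition above) =====
theorem qmark_to_dollar_py_spec : Claim_equal_qmark_to_dollar_py := by
  intro sql _
  show _ = _
  unfold qmark_to_dollar_py qmark_to_dollar_py_alt
  rw [pvGoA_eq_pvGoB]
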